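-- pv_equiv track=rewrite | github.com/JiahangGu/DailyPractice | src/mid/475.py | findRadius
-- ===== SOURCE A (Python) =====
-- from typing import List
--
-- def findRadius(houses: List[int], heaters: List[int]) -> int:
--     houses.sort()
--     heaters.sort()
--
--     def valid(m):
--         for house in houses:
--             left = bs_left(heaters, house)
--             right = bs_right(heaters, house)
--             if left == -1:
--                 left = 0
--             if right == len(heaters):
--                 right -= 1
--             if abs(house - heaters[left]) > m and abs(house - heaters[right]) > m:
--                 return False
--         return True
--
--     def bs_left(nums, t):
--         l, r = 0, len(nums) - 1
--         while l < r:
--             mid = l + (r - l + 1) // 2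
--             if nums[mid] > t:
--                 r = mid - 1
--             else:
--                 l = mid
--         return l
--
--     def bs_right(nums, t):
--         l, r = 0, len(nums) - 1
--         while l < r:
--             mid = l + (r - l) // 2
--             if nums[mid] < t:
--                 l = mid + 1
--             else:
--                 r = mid
--         return l
--
--     l = 0
--     r = 10 ** 9
--     while l < r:
--         mid = l + (r - l) // 2
--         if valid(mid):
--             r = mid
--         else:
--             l = mid + 1
--     return l
-- ===== SOURCE B (Python) =====
-- def findRadius(houses, heaters):
--     ts = sorted(heaters)
--     res = 0
--     j = 0
--     for h in sorted(houses):
--         while j + 1 < len(ts) and abs(ts[j + 1] - h) <= abs(ts[j] - h):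
--             j += 1
--         res = max(res, abs(ts[j] - h))
--     return res
-- ===== Notes on version B (the rewrite author's own statement) =====
-- stated objective: faster
-- what changed: Replaced A's binary search over the answer range [0,1e9] (each probe re-scanning all houses with two hand-rolled binary searches over heaters) by a single two-pointer sweep over the sorted houses that advances one heater pointer and takes the max of nearest-heater distances.
-- intended difference: When some house is farther than 10^9 from every heater, A's answer-space binary search is capped at its hard-coded bound and silently returns 10^9, while B returns the true maximal nearest-heater distance (e.g. houses=[0], heaters=[2000000000]: A=1000000000, B=2000000000), which is the intended answer. — e.g. on findRadius([0], [2000000000]): A returns 1000000000, B returns 2000000000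
import Mathlib
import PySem

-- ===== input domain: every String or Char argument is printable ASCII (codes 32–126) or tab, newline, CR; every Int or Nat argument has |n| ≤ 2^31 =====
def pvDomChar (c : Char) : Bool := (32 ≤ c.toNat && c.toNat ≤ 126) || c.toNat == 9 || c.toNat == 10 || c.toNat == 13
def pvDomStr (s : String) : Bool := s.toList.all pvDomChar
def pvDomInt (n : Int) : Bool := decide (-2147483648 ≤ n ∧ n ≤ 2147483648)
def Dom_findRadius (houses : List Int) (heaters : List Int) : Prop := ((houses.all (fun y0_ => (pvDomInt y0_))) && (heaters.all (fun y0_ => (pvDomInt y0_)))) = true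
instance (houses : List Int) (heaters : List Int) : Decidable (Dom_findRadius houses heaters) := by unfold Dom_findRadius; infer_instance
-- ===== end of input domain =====

-- B replaces A's answer-space binary search (which re-scans all houses with two hand-rolled bisects
-- per probe) by one two-pointer sweep over the sorted houses taking the max of nearest-heater
-- distances.  A sorts its arguments in place; the equivalence proved here is about the return value
-- only (B does not mutate its arguments).  The `fuel` parameters only make the Python while-loops
-- total; the supplied fuel is proved sufficient, so each loop computes exactly what Python computes.

-- ===== PORT A =====
-- bs_left: l, r = 0, len(nums)-1; while l < r: mid = l + (r-l+1)//2; if nums[mid] > t: r = mid-1 else l = mid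
-- every index reached is provably in range (0 ≤ l < mid ≤ r < len), so pyGetD is exact here
def bsLeftGo (nums : List Int) (t : Int) : Nat → Int → Int → Int
  | 0, l, _ => l
  | fuel + 1, l, r =>
    if l < r then
      let mid := l + PySem.Int.floordiv (r - l + 1) 2
      if PySem.List.pyGetD nums mid 0 > t then bsLeftGo nums t fuel l (mid - 1)
      else bsLeftGo nums t fuel mid r
    else l

-- bs_right: l, r = 0, len(nums)-1; while l < r: mid = l + (r-l)//2; if nums[mid] < t: l = mid+1 else r = mid
def bsRightGo (nums : List Int) (t : Int) : Nat → Int → Int → Int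
  | 0, l, _ => l
  | fuel + 1, l, r =>
    if l < r then
      let mid := l + PySem.Int.floordiv (r - l) 2
      if PySem.List.pyGetD nums mid 0 < t then bsRightGo nums t fuel (mid + 1) r
      else bsRightGo nums t fuel l mid
    else l

-- valid(m): for house in houses: … return False; return True  (the two `==` checks are A's dead
-- branches — bs_left never returns -1 and bs_right never returns len — kept literally)
def validA (housesS heatersS : List Int) (m : Int) : Bool :=
  housesS.all (fun house =>
    let left0 := bsLeftGo heatersS house heatersS.length 0 ((heatersS.length : Int) - 1)
    let right0 := bsRightGo heatersS house heatersS.length 0 ((heatersS.length : Int) - 1)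
    let left := if left0 = -1 then 0 else left0
    let right := if right0 = (heatersS.length : Int) then right0 - 1 else right0
    -- heaters[left] / heaters[right] raise IndexError only when heaters = []; Pre_ excludes that
    !(decide (|house - PySem.List.pyGetD heatersS left 0| > m) &&
      decide (|house - PySem.List.pyGetD heatersS right 0| > m)))

-- l, r = 0, 10**9; while l < r: mid = l + (r-l)//2; if valid(mid): r = mid else l = mid+1
def searchGo (housesS heatersS : List Int) : Nat → Int → Int → Int
  | 0, l, _ => l
  | fuel + 1, l, r =>
    if l < r then
      let mid := l + PySem.Int.floordiv (r - l) 2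
      if validA housesS heatersS mid then searchGo housesS heatersS fuel l mid
      else searchGo housesS heatersS fuel (mid + 1) r
    else l

def findRadius (houses : List Int) (heaters : List Int) : Int :=
  let housesS := PySem.List.sorted houses (fun x => x) false
  let heatersS := PySem.List.sorted heaters (fun x => x) false
  searchGo housesS heatersS 1000000000 0 1000000000

-- ===== PORT B =====
-- while j + 1 < len(ts) and abs(ts[j+1] - h) <= abs(ts[j] - h): j += 1
def advanceB (ts : List Int) (h : Int) : Nat → Int → Int
  | 0, j => j
  | fuel + 1, j =>
    if j + 1 < (ts.length : Int) ∧
        |PySem.List.pyGetD ts (j + 1) 0 - h| ≤ |PySem.List.pyGetD ts j 0 - h| then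
      advanceB ts h fuel (j + 1)
    else j

-- for h in sorted(houses): <advance j>; res = max(res, abs(ts[j] - h))
def tpGo (ts : List Int) : List Int → Int → Int → Int
  | [], _, res => res
  | h :: rest, j, res =>
    let j' := advanceB ts h ts.length j
    tpGo ts rest j' (max res |PySem.List.pyGetD ts j' 0 - h|)

def findRadius_alt (houses : List Int) (heaters : List Int) : Int :=
  let ts := PySem.List.sorted heaters (fun x => x) false
  tpGo ts (PySem.List.sorted houses (fun x => x) false) 0 0

-- ===== PRECONDITION & SPEC =====
-- Pre_ excludes exactly the inputs where A raises IndexError (heaters empty while houses is not: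
-- valid() indexes heaters[0]); B raises there too (ts[j] on an empty ts).
def Pre_findRadius (houses : List Int) (heaters : List Int) : Prop :=
  houses = [] ∨ heaters ≠ []
instance (houses : List Int) (heaters : List Int) : Decidable (Pre_findRadius houses heaters) := by
  unfold Pre_findRadius; infer_instance

def pvWitness_findRadius : List Int × List Int := ([1, 5, -3], [2, 10])

-- When some house is farther than 10^9 from every heater, A's answer-space binary search is capped
-- at its hard-coded bound and silently returns 10^9, while B returns the true maximal
-- nearest-heater distance, which is the intended answer.
def D_findRadius (houses : List Int) (heaters : List Int) : Prop :=
  ∃ h ∈ houses, ∀ t ∈ heaters, 1000000000 < |h - t|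
instance (houses : List Int) (heaters : List Int) : Decidable (D_findRadius houses heaters) := by
  unfold D_findRadius; infer_instance

def Spec_findRadius (houses : List Int) (heaters : List Int) (out : Int) : Prop :=
  ¬ D_findRadius houses heaters → out = findRadius_alt houses heaters
instance (houses : List Int) (heaters : List Int) (out : Int) : Decidable (Spec_findRadius houses heaters out) := by
  unfold Spec_findRadius; infer_instance

def pvDiffWitness_findRadius : List Int × List Int := ([0], [2000000000])
def pvDiffWitnessOut_findRadius : Int × Int := (1000000000, 2000000000)

-- ===== CLAIM (what is proved, stated in full; the proofs are below) =====
def Claim_unchanged_findRadius : Prop := ∀ (houses : List Int) (heaters : List Int), Dom_findRadius houses heaters → Pre_findRadius houses heaters → Spec_findRadius houses heaters (findRadius houses heaters)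
def Claim_changed_findRadius : Prop := Dom_findRadius (pvDiffWitness_findRadius.1) (pvDiffWitness_findRadius.2) ∧ Pre_findRadius (pvDiffWitness_findRadius.1) (pvDiffWitness_findRadius.2) ∧ D_findRadius (pvDiffWitness_findRadius.1) (pvDiffWitness_findRadius.2) ∧ findRadius (pvDiffWitness_findRadius.1) (pvDiffWitness_findRadius.2) = pvDiffWitnessOut_findRadius.1 ∧ findRadius_alt (pvDiffWitness_findRadius.1) (pvDiffWitness_findRadius.2) = pvDiffWitnessOut_findRadius.2 ∧ pvDiffWitnessOut_findRadius.1 ≠ pvDiffWitnessOut_findRadius.2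
def Claim_exact_findRadius : Prop := ∀ (houses : List Int) (heaters : List Int), Dom_findRadius houses heaters → Pre_findRadius houses heaters → D_findRadius houses heaters → findRadius houses heaters ≠ findRadius_alt houses heaters

-- ===== LEMMAS AND PROOFS =====

-- list access: sortedness in pyGetD form
theorem getD_mono (ts : List Int) (hts : ts.Pairwise (· ≤ ·)) (i k : Int) (h0 : 0 ≤ i)
    (hik : i ≤ k) (hk : k < (ts.length : Int)) :
    PySem.List.pyGetD ts i 0 ≤ PySem.List.pyGetD ts k 0 := by
  rw [PySem.List.pyGetD_eq_getElem ts 0 h0 (by omega),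
      PySem.List.pyGetD_eq_getElem ts 0 (by omega) hk]
  rcases eq_or_lt_of_le hik with rfl | hlt
  · exact le_refl _
  · exact (List.pairwise_iff_getElem.mp hts) i.toNat k.toNat (by omega) (by omega) (by omega)

theorem getD_mem (ts : List Int) (i : Int) (h0 : 0 ≤ i) (hk : i < (ts.length : Int)) :
    PySem.List.pyGetD ts i 0 ∈ ts := by
  apply PySem.List.pyGetD_mem
  unfold PySem.Raise.InRange
  constructor <;> omega

theorem mem_getD (ts : List Int) (t : Int) (ht : t ∈ ts) :
    ∃ k : Int, 0 ≤ k ∧ k < (ts.length : Int) ∧ PySem.List.pyGetD ts k 0 = t := by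
  rcases List.mem_iff_getElem.mp ht with ⟨k, hk, he⟩
  refine ⟨(k : Int), by omega, by omega, ?_⟩
  rw [PySem.List.pyGetD_eq_getElem ts 0 (by omega) (by omega)]
  simpa using he

-- |b - h| ≤ |a - h| is preserved when h grows (a ≤ b)
theorem step_mono (a b h h₂ : Int) (hab : a ≤ b) (hh : h ≤ h₂) (hs : |b - h| ≤ |a - h|) :
    |b - h₂| ≤ |a - h₂| := by
  rcases abs_cases (b - h) with ⟨e1, _⟩ | ⟨e1, _⟩ <;>
    rcases abs_cases (a - h) with ⟨e2, _⟩ | ⟨e2, _⟩ <;>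
    rcases abs_cases (b - h₂) with ⟨e3, _⟩ | ⟨e3, _⟩ <;>
    rcases abs_cases (a - h₂) with ⟨e4, _⟩ | ⟨e4, _⟩ <;> omega

-- characterisation of A's bs_left
theorem bsLeft_spec (nums : List Int) (t : Int) (hts : nums.Pairwise (· ≤ ·)) :
    ∀ (fuel : Nat) (l r : Int), 0 ≤ l → l ≤ r → r < (nums.length : Int) → (r - l).toNat ≤ fuel →
    l ≤ bsLeftGo nums t fuel l r ∧ bsLeftGo nums t fuel l r ≤ r ∧
      (PySem.List.pyGetD nums (bsLeftGo nums t fuel l r) 0 ≤ t ∨ bsLeftGo nums t fuel l r = l) ∧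
      (∀ j : Int, bsLeftGo nums t fuel l r < j → j ≤ r → t < PySem.List.pyGetD nums j 0) := by
  intro fuel
  induction fuel with
  | zero =>
    intro l r h0 hlr hr hf
    have hrl : l = r := by omega
    subst hrl
    have heq : bsLeftGo nums t 0 l l = l := rfl
    rw [heq]
    exact ⟨le_refl l, le_refl l, Or.inr rfl, fun j h1 h2 => by omega⟩
  | succ fuel ih =>
    intro l r h0 hlr hr hf
    by_cases hlt : l < r
    · have hmb : l < l + PySem.Int.floordiv (r - l + 1) 2 ∧ l + PySem.Int.floordiv (r - l + 1) 2 ≤ r := by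
        rw [PySem.Int.floordiv_eq_ediv_of_pos (by norm_num)]; omega
      have key : bsLeftGo nums t (fuel + 1) l r =
          if PySem.List.pyGetD nums (l + PySem.Int.floordiv (r - l + 1) 2) 0 > t then
            bsLeftGo nums t fuel l ((l + PySem.Int.floordiv (r - l + 1) 2) - 1)
          else bsLeftGo nums t fuel (l + PySem.Int.floordiv (r - l + 1) 2) r := by
        conv_lhs => rw [bsLeftGo]
        rw [if_pos hlt]
      rw [key]
      set mid := l + PySem.Int.floordiv (r - l + 1) 2 with hmiddef
      by_cases hc : PySem.List.pyGetD nums mid 0 > t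
      · rw [if_pos hc]
        obtain ⟨a1, a2, a3, a4⟩ := ih l (mid - 1) h0 (by omega) (by omega) (by omega)
        refine ⟨a1, by omega, a3, ?_⟩
        intro j hj1 hj2
        by_cases hj3 : j ≤ mid - 1
        · exact a4 j hj1 hj3
        · calc t < PySem.List.pyGetD nums mid 0 := hc
            _ ≤ PySem.List.pyGetD nums j 0 := getD_mono nums hts mid j (by omega) (by omega) (by omega)
      · rw [if_neg hc]
        obtain ⟨a1, a2, a3, a4⟩ := ih mid r (by omega) (by omega) hr (by omega)
        refine ⟨by omega, a2, ?_, a4⟩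
        rcases a3 with h | h
        · exact Or.inl h
        · rw [h]; exact Or.inl (by omega)
    · have hrl : l = r := by omega
      subst hrl
      have heq : bsLeftGo nums t (fuel + 1) l l = l := by simp [bsLeftGo]
      rw [heq]
      exact ⟨le_refl l, le_refl l, Or.inr rfl, fun j h1 h2 => by omega⟩

-- characterisation of A's bs_right
theorem bsRight_spec (nums : List Int) (t : Int) (hts : nums.Pairwise (· ≤ ·)) :
    ∀ (fuel : Nat) (l r : Int), 0 ≤ l → l ≤ r → r < (nums.length : Int) → (r - l).toNat ≤ fuel →
    l ≤ bsRightGo nums t fuel l r ∧ bsRightGo nums t fuel l r ≤ r ∧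
      (t ≤ PySem.List.pyGetD nums (bsRightGo nums t fuel l r) 0 ∨ bsRightGo nums t fuel l r = r) ∧
      (∀ j : Int, l ≤ j → j < bsRightGo nums t fuel l r → PySem.List.pyGetD nums j 0 < t) := by
  intro fuel
  induction fuel with
  | zero =>
    intro l r h0 hlr hr hf
    have hrl : l = r := by omega
    subst hrl
    have heq : bsRightGo nums t 0 l l = l := rfl
    rw [heq]
    exact ⟨le_refl l, le_refl l, Or.inr rfl, fun j h1 h2 => by omega⟩
  | succ fuel ih =>
    intro l r h0 hlr hr hf
    by_cases hlt : l < r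
    · have hmb : l ≤ l + PySem.Int.floordiv (r - l) 2 ∧ l + PySem.Int.floordiv (r - l) 2 < r := by
        rw [PySem.Int.floordiv_eq_ediv_of_pos (by norm_num)]; omega
      have key : bsRightGo nums t (fuel + 1) l r =
          if PySem.List.pyGetD nums (l + PySem.Int.floordiv (r - l) 2) 0 < t then
            bsRightGo nums t fuel ((l + PySem.Int.floordiv (r - l) 2) + 1) r
          else bsRightGo nums t fuel l (l + PySem.Int.floordiv (r - l) 2) := by
        conv_lhs => rw [bsRightGo]
        rw [if_pos hlt]
      rw [key]
      set mid := l + PySem.Int.floordiv (r - l) 2 with hmiddef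
      by_cases hc : PySem.List.pyGetD nums mid 0 < t
      · rw [if_pos hc]
        obtain ⟨a1, a2, a3, a4⟩ := ih (mid + 1) r (by omega) (by omega) hr (by omega)
        refine ⟨by omega, a2, a3, ?_⟩
        intro j hj1 hj2
        by_cases hj3 : mid + 1 ≤ j
        · exact a4 j hj3 hj2
        · calc PySem.List.pyGetD nums j 0 ≤ PySem.List.pyGetD nums mid 0 :=
                getD_mono nums hts j mid (by omega) (by omega) (by omega)
            _ < t := hc
      · rw [if_neg hc]
        obtain ⟨a1, a2, a3, a4⟩ := ih l mid h0 (by omega) (by omega) (by omega)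
        refine ⟨a1, by omega, ?_, a4⟩
        rcases a3 with h | h
        · exact Or.inl h
        · rw [h]; exact Or.inl (by omega)
    · have hrl : l = r := by omega
      subst hrl
      have heq : bsRightGo nums t (fuel + 1) l l = l := by simp [bsRightGo]
      rw [heq]
      exact ⟨le_refl l, le_refl l, Or.inr rfl, fun j h1 h2 => by omega⟩

-- the two bisect candidates contain a nearest heater
theorem cand_nearest (ts : List Int) (hts : ts.Pairwise (· ≤ ·)) (h : Int) (L0 R0 : Int)
    (_hL1 : 0 ≤ L0) (hL2 : L0 ≤ (ts.length : Int) - 1)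
    (hL3 : PySem.List.pyGetD ts L0 0 ≤ h ∨ L0 = 0)
    (hL4 : ∀ j : Int, L0 < j → j ≤ (ts.length : Int) - 1 → h < PySem.List.pyGetD ts j 0)
    (hR1 : 0 ≤ R0) (_hR2 : R0 ≤ (ts.length : Int) - 1)
    (hR3 : h ≤ PySem.List.pyGetD ts R0 0 ∨ R0 = (ts.length : Int) - 1)
    (hR4 : ∀ j : Int, 0 ≤ j → j < R0 → PySem.List.pyGetD ts j 0 < h) :
    ∀ t ∈ ts, |h - PySem.List.pyGetD ts L0 0| ≤ |h - t| ∨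
      |h - PySem.List.pyGetD ts R0 0| ≤ |h - t| := by
  intro t ht
  obtain ⟨k, hk0, hk1, hk2⟩ := mem_getD ts t ht
  subst hk2
  by_cases hcase : PySem.List.pyGetD ts k 0 ≤ h
  · left
    have hkL : k ≤ L0 := by
      by_contra hkk
      exact absurd (hL4 k (by omega) (by omega)) (by omega)
    have hmono : PySem.List.pyGetD ts k 0 ≤ PySem.List.pyGetD ts L0 0 :=
      getD_mono ts hts k L0 hk0 hkL (by omega)
    rcases hL3 with hv | hz
    · rcases abs_cases (h - PySem.List.pyGetD ts L0 0) with ⟨e1, _⟩ | ⟨e1, _⟩ <;>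
        rcases abs_cases (h - PySem.List.pyGetD ts k 0) with ⟨e2, _⟩ | ⟨e2, _⟩ <;> omega
    · have : k = L0 := by omega
      rw [this]
  · right
    have hkR : R0 ≤ k := by
      by_contra hkk
      exact absurd (hR4 k hk0 (by omega)) (by omega)
    have hmono : PySem.List.pyGetD ts R0 0 ≤ PySem.List.pyGetD ts k 0 :=
      getD_mono ts hts R0 k hR1 hkR hk1
    rcases hR3 with hv | hz
    · rcases abs_cases (h - PySem.List.pyGetD ts R0 0) with ⟨e1, _⟩ | ⟨e1, _⟩ <;>
        rcases abs_cases (h - PySem.List.pyGetD ts k 0) with ⟨e2, _⟩ | ⟨e2, _⟩ <;> omega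
    · have : k = R0 := by omega
      rw [this]

-- valid(m) says: every house has SOME heater within distance m
theorem validA_iff (hs ts : List Int) (hts : ts.Pairwise (· ≤ ·)) (hne : ts ≠ []) (m : Int) :
    validA hs ts m = true ↔ ∀ h ∈ hs, ∃ t ∈ ts, |h - t| ≤ m := by
  have hlen : 1 ≤ (ts.length : Int) := by
    have := List.length_pos_iff.mpr hne
    omega
  unfold validA
  rw [List.all_eq_true]
  apply forall_congr'
  intro h
  apply imp_congr_right
  intro _
  obtain ⟨l1, l2, l3, l4⟩ :=
    bsLeft_spec ts h hts ts.length 0 ((ts.length : Int) - 1) le_rfl (by omega) (by omega) (by omega)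
  obtain ⟨r1, r2, r3, r4⟩ :=
    bsRight_spec ts h hts ts.length 0 ((ts.length : Int) - 1) le_rfl (by omega) (by omega) (by omega)
  set L0 := bsLeftGo ts h ts.length 0 ((ts.length : Int) - 1) with hL0
  set R0 := bsRightGo ts h ts.length 0 ((ts.length : Int) - 1) with hR0
  show (!(decide (|h - PySem.List.pyGetD ts (if L0 = -1 then 0 else L0) 0| > m) &&
      decide (|h - PySem.List.pyGetD ts (if R0 = (ts.length : Int) then R0 - 1 else R0) 0| > m))) = true ↔ _
  rw [if_neg (by omega : ¬ L0 = -1), if_neg (by omega : ¬ R0 = (ts.length : Int))]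
  simp only [Bool.not_eq_eq_eq_not, Bool.not_true, Bool.not_and, Bool.or_eq_true,
    decide_eq_false_iff_not, not_lt]
  constructor
  · intro hv
    rcases hv with hv | hv
    · exact ⟨PySem.List.pyGetD ts L0 0, getD_mem ts L0 (by omega) (by omega), hv⟩
    · exact ⟨PySem.List.pyGetD ts R0 0, getD_mem ts R0 (by omega) (by omega), hv⟩
  · intro ⟨t, ht, hdist⟩
    rcases cand_nearest ts hts h L0 R0 l1 l2 l3 l4 r1 r2 r3 r4 t ht with hcc | hcc
    · exact Or.inl (le_trans hcc hdist)
    · exact Or.inr (le_trans hcc hdist)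

-- the result of the answer-space binary search stays in [l, r]
theorem searchGo_bounds (hs ts : List Int) :
    ∀ (fuel : Nat) (l r : Int), l ≤ r →
    l ≤ searchGo hs ts fuel l r ∧ searchGo hs ts fuel l r ≤ r := by
  intro fuel
  induction fuel with
  | zero => intro l r hlr; exact ⟨le_refl l, hlr⟩
  | succ fuel ih =>
    intro l r hlr
    by_cases hlt : l < r
    · have hmb : l ≤ l + PySem.Int.floordiv (r - l) 2 ∧ l + PySem.Int.floordiv (r - l) 2 < r := by
        rw [PySem.Int.floordiv_eq_ediv_of_pos (by norm_num)]; omega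
      have key : searchGo hs ts (fuel + 1) l r =
          if validA hs ts (l + PySem.Int.floordiv (r - l) 2) then
            searchGo hs ts fuel l (l + PySem.Int.floordiv (r - l) 2)
          else searchGo hs ts fuel ((l + PySem.Int.floordiv (r - l) 2) + 1) r := by
        conv_lhs => rw [searchGo]
        rw [if_pos hlt]
      rw [key]
      set mid := l + PySem.Int.floordiv (r - l) 2 with hmiddef
      by_cases hc : validA hs ts mid
      · rw [if_pos hc]
        obtain ⟨a1, a2⟩ := ih l mid (by omega)
        exact ⟨a1, by omega⟩
      · rw [if_neg hc]
        obtain ⟨a1, a2⟩ := ih (mid + 1) r (by omega)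
        exact ⟨by omega, a2⟩
    · have hrl : l = r := by omega
      subst hrl
      have heq : searchGo hs ts (fuel + 1) l l = l := by simp [searchGo]
      rw [heq]
      exact ⟨le_refl l, le_refl l⟩

-- with enough fuel and valid(r), the search returns the least valid value of [l, r]
theorem searchGo_least (hs ts : List Int)
    (hmono : ∀ m m' : Int, m ≤ m' → validA hs ts m = true → validA hs ts m' = true) :
    ∀ (fuel : Nat) (l r : Int), l ≤ r → (r - l).toNat ≤ fuel → validA hs ts r = true →
    validA hs ts (searchGo hs ts fuel l r) = true ∧
      (∀ j : Int, l ≤ j → j < searchGo hs ts fuel l r → validA hs ts j = false) := by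
  intro fuel
  induction fuel with
  | zero =>
    intro l r hlr hf hv
    have hrl : l = r := by omega
    subst hrl
    have heq : searchGo hs ts 0 l l = l := rfl
    rw [heq]
    exact ⟨hv, fun j h1 h2 => by omega⟩
  | succ fuel ih =>
    intro l r hlr hf hv
    by_cases hlt : l < r
    · have hmb : l ≤ l + PySem.Int.floordiv (r - l) 2 ∧ l + PySem.Int.floordiv (r - l) 2 < r := by
        rw [PySem.Int.floordiv_eq_ediv_of_pos (by norm_num)]; omega
      have key : searchGo hs ts (fuel + 1) l r =
          if validA hs ts (l + PySem.Int.floordiv (r - l) 2) then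
            searchGo hs ts fuel l (l + PySem.Int.floordiv (r - l) 2)
          else searchGo hs ts fuel ((l + PySem.Int.floordiv (r - l) 2) + 1) r := by
        conv_lhs => rw [searchGo]
        rw [if_pos hlt]
      rw [key]
      set mid := l + PySem.Int.floordiv (r - l) 2 with hmiddef
      by_cases hc : validA hs ts mid
      · rw [if_pos hc]
        exact ih l mid (by omega) (by omega) hc
      · rw [if_neg hc]
        obtain ⟨a1, a2⟩ := ih (mid + 1) r (by omega) (by omega) hv
        refine ⟨a1, ?_⟩
        intro j hj1 hj2
        by_cases hj3 : mid + 1 ≤ j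
        · exact a2 j hj3 hj2
        · rcases Bool.eq_false_or_eq_true (validA hs ts j) with hb | hb
          · exact absurd (hmono j mid (by omega) hb) (by simpa using hc)
          · exact hb
    · have hrl : l = r := by omega
      subst hrl
      have heq : searchGo hs ts (fuel + 1) l l = l := by simp [searchGo]
      rw [heq]
      exact ⟨hv, fun j h1 h2 => by omega⟩

-- cross-house invariant of B's pointer: every step passed so far moved towards h
def InvB (ts : List Int) (j h : Int) : Prop :=
  ∀ i : Int, 0 ≤ i → i + 1 ≤ j →
    |PySem.List.pyGetD ts (i + 1) 0 - h| ≤ |PySem.List.pyGetD ts i 0 - h|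

theorem invB_mono (ts : List Int) (hts : ts.Pairwise (· ≤ ·)) (j h h₂ : Int)
    (hj : j < (ts.length : Int)) (hh : h ≤ h₂) (hI : InvB ts j h) : InvB ts j h₂ := by
  intro i h0 hij
  exact step_mono _ _ _ _ (getD_mono ts hts i (i+1) h0 (by omega) (by omega)) hh (hI i h0 hij)

-- walking left towards j never helps: distances weakly decrease along passed steps
theorem invB_chain (ts : List Int) (j h : Int) (hI : InvB ts j h) :
    ∀ i : Int, 0 ≤ i → i ≤ j → |PySem.List.pyGetD ts j 0 - h| ≤ |PySem.List.pyGetD ts i 0 - h| := by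
  suffices hn : ∀ n : Nat, ∀ i : Int, 0 ≤ i → i ≤ j → j - i = (n : Int) →
      |PySem.List.pyGetD ts j 0 - h| ≤ |PySem.List.pyGetD ts i 0 - h| by
    intro i h0 hij
    exact hn (j - i).toNat i h0 hij (by omega)
  intro n
  induction n with
  | zero =>
    intro i h0 hij hd
    have : i = j := by omega
    rw [this]
  | succ n ihn =>
    intro i h0 hij hd
    calc |PySem.List.pyGetD ts j 0 - h| ≤ |PySem.List.pyGetD ts (i + 1) 0 - h| :=
          ihn (i + 1) (by omega) (by omega) (by omega)
      _ ≤ |PySem.List.pyGetD ts i 0 - h| := hI i h0 (by omega)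

-- after the inner while, ts[j'] is a nearest heater to h
theorem advanceB_spec (ts : List Int) (hts : ts.Pairwise (· ≤ ·)) (h : Int) :
    ∀ (fuel : Nat) (j : Int), 0 ≤ j → j < (ts.length : Int) →
      ((ts.length : Int) - j).toNat ≤ fuel → InvB ts j h →
    j ≤ advanceB ts h fuel j ∧ advanceB ts h fuel j < (ts.length : Int) ∧
      0 ≤ advanceB ts h fuel j ∧ InvB ts (advanceB ts h fuel j) h ∧
      (∀ i : Int, 0 ≤ i → i < (ts.length : Int) →
        |PySem.List.pyGetD ts (advanceB ts h fuel j) 0 - h| ≤ |PySem.List.pyGetD ts i 0 - h|) := by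
  intro fuel
  induction fuel with
  | zero =>
    intro j h0 hj hf hI
    exfalso
    omega
  | succ fuel ih =>
    intro j h0 hj hf hI
    by_cases hc : j + 1 < (ts.length : Int) ∧
        |PySem.List.pyGetD ts (j + 1) 0 - h| ≤ |PySem.List.pyGetD ts j 0 - h|
    · have key : advanceB ts h (fuel + 1) j = advanceB ts h fuel (j + 1) := by
        conv_lhs => rw [advanceB]
        rw [if_pos hc]
      rw [key]
      have hI' : InvB ts (j + 1) h := by
        intro i hi0 hi1
        rcases eq_or_lt_of_le hi1 with he | hlt
        · have : i = j := by omega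
          rw [this]
          exact hc.2
        · exact hI i hi0 (by omega)
      obtain ⟨a1, a2, a3, a4, a5⟩ := ih (j + 1) (by omega) hc.1 (by omega) hI'
      exact ⟨by omega, a2, a3, a4, a5⟩
    · have key : advanceB ts h (fuel + 1) j = j := by
        conv_lhs => rw [advanceB]
        rw [if_neg hc]
      rw [key]
      refine ⟨le_refl j, hj, h0, hI, ?_⟩
      intro i hi0 hi
      by_cases hij : i ≤ j
      · exact invB_chain ts j h hI i hi0 hij
      · -- the loop stopped with j+1 in range, so ts[j+1] is strictly farther and lies right of h
        have hjlen : j + 1 < (ts.length : Int) := by omega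
        have hfar : ¬ |PySem.List.pyGetD ts (j + 1) 0 - h| ≤ |PySem.List.pyGetD ts j 0 - h| :=
          fun hcon => hc ⟨hjlen, hcon⟩
        have hm1 : PySem.List.pyGetD ts j 0 ≤ PySem.List.pyGetD ts (j + 1) 0 :=
          getD_mono ts hts j (j + 1) h0 (by omega) hjlen
        have hm2 : PySem.List.pyGetD ts (j + 1) 0 ≤ PySem.List.pyGetD ts i 0 :=
          getD_mono ts hts (j + 1) i (by omega) (by omega) hi
        rcases abs_cases (PySem.List.pyGetD ts (j + 1) 0 - h) with ⟨e1, _⟩ | ⟨e1, _⟩ <;>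
          rcases abs_cases (PySem.List.pyGetD ts j 0 - h) with ⟨e2, _⟩ | ⟨e2, _⟩ <;>
          rcases abs_cases (PySem.List.pyGetD ts i 0 - h) with ⟨e3, _⟩ | ⟨e3, _⟩ <;> omega

-- full specification of B's sweep
theorem tpGo_spec (ts : List Int) (hts : ts.Pairwise (· ≤ ·)) (_hne : ts ≠ []) :
    ∀ (hs : List Int) (j res : Int), hs.Pairwise (· ≤ ·) → 0 ≤ j → j < (ts.length : Int) →
      (∀ h ∈ hs, InvB ts j h) →
    res ≤ tpGo ts hs j res ∧
      (∀ h ∈ hs, ∃ t ∈ ts, |h - t| ≤ tpGo ts hs j res) ∧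
      (∀ m : Int, res ≤ m → (∀ h ∈ hs, ∃ t ∈ ts, |h - t| ≤ m) → tpGo ts hs j res ≤ m) := by
  intro hs
  induction hs with
  | nil =>
    intro j res _ _ _ _
    exact ⟨le_refl res, by simp, fun m hm _ => hm⟩
  | cons h rest ihs =>
    intro j res hpw h0 hj hIall
    rw [List.pairwise_cons] at hpw
    obtain ⟨a1, a2, a3, a4, a5⟩ :=
      advanceB_spec ts hts h ts.length j h0 hj (by omega) (hIall h (by simp))
    set j' := advanceB ts h ts.length j with hj'
    have heq : tpGo ts (h :: rest) j res = tpGo ts rest j' (max res |PySem.List.pyGetD ts j' 0 - h|) := rfl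
    rw [heq]
    have hIrest : ∀ h₂ ∈ rest, InvB ts j' h₂ := by
      intro h₂ hmem
      exact invB_mono ts hts j' h h₂ a2 (hpw.1 h₂ hmem) a4
    obtain ⟨b1, b2, b3⟩ := ihs j' (max res |PySem.List.pyGetD ts j' 0 - h|) hpw.2 a3 a2 hIrest
    refine ⟨le_trans (le_max_left _ _) b1, ?_, ?_⟩
    · intro h₂ hmem
      rcases List.mem_cons.mp hmem with he | hmem2
      · subst he
        refine ⟨PySem.List.pyGetD ts j' 0, getD_mem ts j' a3 a2, ?_⟩
        rw [abs_sub_comm]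
        exact le_trans (le_max_right _ _) b1
      · exact b2 h₂ hmem2
    · intro m hm hcov
      obtain ⟨t, ht, hd⟩ := hcov h (by simp)
      obtain ⟨k, hk0, hk1, hk2⟩ := mem_getD ts t ht
      have hnear : |PySem.List.pyGetD ts j' 0 - h| ≤ m := by
        calc |PySem.List.pyGetD ts j' 0 - h| ≤ |PySem.List.pyGetD ts k 0 - h| := a5 k hk0 hk1
          _ = |h - t| := by rw [hk2, abs_sub_comm]
          _ ≤ m := hd
      exact b3 m (max_le hm hnear) (fun h₂ hmem => hcov h₂ (List.mem_cons_of_mem h hmem))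

-- assembling: the monotone probe, then least-valid = max nearest distance
theorem validA_mono (hs ts : List Int) (hts : ts.Pairwise (· ≤ ·)) (hne : ts ≠ []) :
    ∀ m m' : Int, m ≤ m' → validA hs ts m = true → validA hs ts m' = true := by
  intro m m' hmm hv
  rw [validA_iff hs ts hts hne] at hv ⊢
  intro h hh
  obtain ⟨t, ht, hd⟩ := hv h hh
  exact ⟨t, ht, le_trans hd hmm⟩

theorem main_eq (houses heaters : List Int) (hpre : Pre_findRadius houses heaters)
    (hnd : ¬ D_findRadius houses heaters) :
    findRadius houses heaters = findRadius_alt houses heaters := by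
  have hhsp : (PySem.List.sorted houses (fun x => x) false).Pairwise (· ≤ ·) :=
    PySem.List.sorted_pairwise houses (fun x => x)
  have htsp : (PySem.List.sorted heaters (fun x => x) false).Pairwise (· ≤ ·) :=
    PySem.List.sorted_pairwise heaters (fun x => x)
  set hs := PySem.List.sorted houses (fun x => x) false with hhs
  set ts := PySem.List.sorted heaters (fun x => x) false with hts
  show searchGo hs ts 1000000000 0 1000000000 = tpGo ts hs 0 0
  by_cases hho : houses = []
  · -- no houses: valid(m) is vacuously true, the search returns 0, and so does the sweep
    have hhsnil : hs = [] := by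
      rw [hhs, hho]
      rfl
    rw [hhsnil]
    have hval : ∀ m : Int, validA [] ts m = true := fun m => rfl
    obtain ⟨hb1, hb2⟩ := searchGo_bounds [] ts 1000000000 0 1000000000 (by omega)
    obtain ⟨_, hleast⟩ := searchGo_least [] ts (fun m m' _ _ => hval m') 1000000000 0 1000000000
      (by omega) (by omega) (hval _)
    have : searchGo [] ts 1000000000 0 1000000000 = 0 := by
      by_contra hcongt
      have := hleast 0 (le_refl 0) (by omega)
      rw [hval 0] at this
      exact Bool.true_eq_false.mp this
    rw [this]
    rfl
  · -- houses (hence heaters) nonempty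
    have hhe : heaters ≠ [] := by
      rcases hpre with h | h
      · exact absurd h hho
      · exact h
    have htsne : ts ≠ [] := by
      intro hnil
      apply hhe
      have hp : ts.Perm heaters := by
        rw [hts]
        exact PySem.List.sorted_perm heaters (fun x => x) false
      rw [hnil] at hp
      exact (hp.symm).eq_nil
    have htslen : 0 < (ts.length : Int) := by
      have := List.length_pos_iff.mpr htsne
      omega
    have hmono := validA_mono hs ts htsp htsne
    -- ¬D_: every house has a heater within 10^9
    have hcov9 : ∀ h ∈ hs, ∃ t ∈ ts, |h - t| ≤ 1000000000 := by
      intro h hh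
      rw [hhs, PySem.List.mem_sorted] at hh
      unfold D_findRadius at hnd
      push Not at hnd
      obtain ⟨t, ht, hd⟩ := hnd h hh
      exact ⟨t, by rw [hts, PySem.List.mem_sorted]; exact ht, hd⟩
    have hvr : validA hs ts 1000000000 = true :=
      (validA_iff hs ts htsp htsne _).mpr hcov9
    obtain ⟨ha1, ha2⟩ := searchGo_bounds hs ts 1000000000 0 1000000000 (by omega)
    obtain ⟨haval, haleast⟩ :=
      searchGo_least hs ts hmono 1000000000 0 1000000000 (by omega) (by omega) hvr
    obtain ⟨hb1, hb2, hb3⟩ := tpGo_spec ts htsp htsne hs 0 0 hhsp (le_refl 0) htslen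
      (fun h _ i hi0 hi1 => absurd hi1 (by omega))
    set A := searchGo hs ts 1000000000 0 1000000000 with hA
    set B := tpGo ts hs 0 0 with hB
    have hBA : B ≤ A :=
      hb3 A ha1 ((validA_iff hs ts htsp htsne A).mp haval)
    have hAB : A ≤ B := by
      by_contra hgt
      have hfalse := haleast B (by omega) (by omega)
      have htrue := (validA_iff hs ts htsp htsne B).mpr hb2
      rw [htrue] at hfalse
      exact Bool.true_eq_false.mp hfalse
    omega

-- ===== VERDICT (by name: the statement is the Claim_ definition above) =====
theorem findRadius_spec : Claim_unchanged_findRadius := by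
  intro houses heaters _ hpre
  unfold Spec_findRadius
  intro hnd
  exact main_eq houses heaters hpre hnd
theorem findRadius_changed : Claim_changed_findRadius := by unfold Claim_changed_findRadius; decide
theorem findRadius_tight : Claim_exact_findRadius := by
  intro houses heaters _ hpre hD
  obtain ⟨h0, hh0, hfar⟩ := hD
  have hhe : heaters ≠ [] := by
    rcases hpre with h | h
    · rw [h] at hh0
      exact absurd hh0 (List.not_mem_nil)
    · exact h
  have hhsp : (PySem.List.sorted houses (fun x => x) false).Pairwise (· ≤ ·) :=
    PySem.List.sorted_pairwise houses (fun x => x)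
  have htsp : (PySem.List.sorted heaters (fun x => x) false).Pairwise (· ≤ ·) :=
    PySem.List.sorted_pairwise heaters (fun x => x)
  set hs := PySem.List.sorted houses (fun x => x) false with hhs
  set ts := PySem.List.sorted heaters (fun x => x) false with hts
  show searchGo hs ts 1000000000 0 1000000000 ≠ tpGo ts hs 0 0
  have htsne : ts ≠ [] := by
    intro hnil
    apply hhe
    have hp : ts.Perm heaters := by
      rw [hts]
      exact PySem.List.sorted_perm heaters (fun x => x) false
    rw [hnil] at hp
    exact (hp.symm).eq_nil
  have htslen : 0 < (ts.length : Int) := by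
    have := List.length_pos_iff.mpr htsne
    omega
  obtain ⟨ha1, ha2⟩ := searchGo_bounds hs ts 1000000000 0 1000000000 (by omega)
  obtain ⟨hb1, hb2, hb3⟩ := tpGo_spec ts htsp htsne hs 0 0 hhsp (le_refl 0) htslen
    (fun h _ i hi0 hi1 => absurd hi1 (by omega))
  obtain ⟨t, ht, hd⟩ := hb2 h0 (by rw [hhs, PySem.List.mem_sorted]; exact hh0)
  have hbig : 1000000000 < |h0 - t| := hfar t (by rw [hts, PySem.List.mem_sorted] at ht; exact ht)
  omega
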